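-- pv_equiv track=rewrite | github.com/VisLab/HEDToolsArchived | python/webinterface/webinterface/utils.py | _get_validation_issue_count
-- ===== SOURCE A (Python) =====
-- def _get_validation_issue_count(validation_issues):
--     """Gets the number of validation issues in the spreadsheet.
--
--     Parameters
--     ----------
--     validation_issues: string
--         A string containing the validation issues found in the spreadsheet.
--
--     Returns
--     -------
--         integer
--         A integer representing the number of validation issues.
--     """
--     number_of_issues = 0;
--     split_validation_issues = validation_issues.split('\n');
--     if split_validation_issues != ['']:
--         for validation_issue_line in split_validation_issues:
--             if validation_issue_line.startswith('\t'):
--                 number_of_issues += 1;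
--     return number_of_issues;
-- ===== SOURCE B (Python) =====
-- def _get_validation_issue_count(validation_issues):
--     """Gets the number of validation issues in the spreadsheet."""
--     return (1 if validation_issues.startswith('\t') else 0) + validation_issues.count('\n\t')
-- ===== Notes on version B (the rewrite author's own statement) =====
-- stated objective: simpler
-- what changed: Replaces the split-into-lines list plus per-line startswith loop (and the inert empty-split guard) by a single substring count: a tab-started line occurs exactly at a leading tab or after each newline-then-tab boundary.
import Mathlib
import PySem

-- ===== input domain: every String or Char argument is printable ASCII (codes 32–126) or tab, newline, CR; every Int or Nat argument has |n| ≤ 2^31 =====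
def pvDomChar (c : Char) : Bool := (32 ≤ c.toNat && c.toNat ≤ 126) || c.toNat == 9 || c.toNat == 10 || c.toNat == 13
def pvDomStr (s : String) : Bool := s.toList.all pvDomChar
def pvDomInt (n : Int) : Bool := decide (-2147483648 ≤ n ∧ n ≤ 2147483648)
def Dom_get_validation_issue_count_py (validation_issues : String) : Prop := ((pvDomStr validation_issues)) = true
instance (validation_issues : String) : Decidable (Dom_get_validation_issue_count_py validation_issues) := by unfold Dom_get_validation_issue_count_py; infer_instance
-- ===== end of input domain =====

-- B counts tab-started lines without splitting: a leading tab plus the occurrences of "\n\t" (simpler; the "!= ['']" guard is provably inert).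

-- ===== PORT A =====
def get_validation_issue_count_py (validation_issues : String) : Int :=
  let split_validation_issues := PySem.Chars.splitOn validation_issues.toList ['\n']
  if split_validation_issues ≠ [[]] then
    split_validation_issues.foldl
      (fun acc line => if PySem.Chars.startswith line ['\t'] then acc + 1 else acc) 0
  else 0

-- ===== PORT B =====
def get_validation_issue_count_py_alt (validation_issues : String) : Int :=
  (if PySem.Str.startswith validation_issues "\t" then (1 : Int) else 0)
    + (PySem.Str.count validation_issues "\n\t" : Int)

-- ===== PRECONDITION & SPEC =====
def Spec_get_validation_issue_count_py (validation_issues : String) (out : Int) : Prop := out = get_validation_issue_count_py_alt validation_issues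
instance (validation_issues : String) (out : Int) : Decidable (Spec_get_validation_issue_count_py validation_issues out) := by unfold Spec_get_validation_issue_count_py; infer_instance

-- ===== CLAIM (what is proved, stated in full; the proofs are below) =====
def Claim_equal_get_validation_issue_count_py : Prop := ∀ (validation_issues : String), Dom_get_validation_issue_count_py validation_issues → Spec_get_validation_issue_count_py validation_issues (get_validation_issue_count_py validation_issues)

-- ===== LEMMAS AND PROOFS =====

-- A simple structural recursion for split on '\n'
def splitNL : List Char → List (List Char)
  | [] => [[]]
  | c :: r => if c = '\n' then [] :: splitNL r
              else match splitNL r with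
                   | h :: t => (c :: h) :: t
                   | [] => [[c]]

-- A simple structural recursion for the non-overlapping count of "\n\t"
def cntNT : List Char → Nat
  | [] => 0
  | c :: r => (if c = '\n' ∧ PySem.Chars.startswith r ['\t'] then 1 else 0) + cntNT r

theorem splitNL_ne_nil (l : List Char) : splitNL l ≠ [] := by
  cases l with
  | nil => simp [splitNL]
  | cons c r =>
    simp only [splitNL]
    split
    · simp
    · split <;> simp_all

def consHead (x : List Char) : List (List Char) → List (List Char)
  | [] => [x]
  | h :: t => (x ++ h) :: t

theorem consHead_nil (p : List (List Char)) (h : p ≠ []) : consHead [] p = p := by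
  cases p with
  | nil => exact absurd rfl h
  | cons a t => simp [consHead]

theorem splitOn_go_nl (fuel : Nat) (l cur : List Char) (acc : List (List Char))
    (h : l.length ≤ fuel) :
    PySem.Chars.splitOn.go ['\n'] fuel l cur acc
      = acc.reverse ++ consHead cur.reverse (splitNL l) := by
  induction fuel generalizing l cur acc with
  | zero =>
    have hl : l = [] := List.eq_nil_of_length_eq_zero (Nat.le_zero.mp h)
    subst hl
    simp [PySem.Chars.splitOn.go, splitNL, consHead]
  | succ f ih =>
    cases l with
    | nil => simp [PySem.Chars.splitOn.go, splitNL, consHead]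
    | cons c rest =>
      simp only [PySem.Chars.splitOn.go]
      by_cases hc : c = '\n'
      · subst hc
        have hpre : List.isPrefixOf ['\n'] ('\n' :: rest) = true := by
          simp [List.isPrefixOf]
        rw [if_pos hpre]
        have hlen : (List.drop (['\n'] : List Char).length ('\n' :: rest)).length ≤ f := by
          simp at h ⊢; omega
        rw [ih _ _ _ hlen]
        have hspl : splitNL ('\n' :: rest) = [] :: splitNL rest := by simp [splitNL]
        rw [hspl]
        simp only [List.length_cons, List.length_nil, Nat.zero_add, List.drop_succ_cons,
          List.drop_zero, List.reverse_nil, List.reverse_cons]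
        rw [consHead_nil _ (splitNL_ne_nil rest)]
        simp [consHead]
      · rw [if_neg (by simp [List.isPrefixOf]; exact fun h' => hc h'.symm)]
        have hlen : rest.length ≤ f := by simp at h; omega
        rw [ih _ _ _ hlen]
        simp only [splitNL, if_neg hc, List.reverse_cons]
        cases hs : splitNL rest with
        | nil => exact absurd hs (splitNL_ne_nil rest)
        | cons hh tt => simp [consHead]

theorem splitOn_nl_eq (l : List Char) :
    PySem.Chars.splitOn l ['\n'] = splitNL l := by
  unfold PySem.Chars.splitOn
  rw [splitOn_go_nl _ _ _ _ (by omega)]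
  simp [consHead_nil _ (splitNL_ne_nil l)]

theorem sw_nil : PySem.Chars.startswith ([] : List Char) ['\t'] = false := by
  simp [PySem.Chars.startswith, List.isPrefixOf]

theorem sw_cons (c : Char) (r : List Char) :
    PySem.Chars.startswith (c :: r) ['\t'] = decide (c = '\t') := by
  by_cases h : c = '\t'
  · simp [PySem.Chars.startswith, List.isPrefixOf, h]
  · simp [PySem.Chars.startswith, List.isPrefixOf, h]
    exact fun h' => h h'.symm

theorem count_go_nt (fuel : Nat) (l : List Char) (acc : Nat) (h : l.length ≤ fuel) :
    PySem.Chars.count.go ['\n', '\t'] fuel l acc = acc + cntNT l := by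
  induction fuel generalizing l acc with
  | zero =>
    have hl : l = [] := List.eq_nil_of_length_eq_zero (Nat.le_zero.mp h)
    subst hl
    simp [PySem.Chars.count.go, cntNT]
  | succ f ih =>
    match l, h with
    | [], _ => simp [PySem.Chars.count.go, cntNT]
    | [c], h =>
      simp only [PySem.Chars.count.go]
      rw [if_neg (by simp [List.isPrefixOf])]
      rw [ih [] acc (by simp)]
      simp [cntNT, sw_nil]
    | c :: d :: r, h =>
      simp only [PySem.Chars.count.go]
      by_cases hm : c = '\n' ∧ d = '\t'
      · obtain ⟨hc, hd⟩ := hm; subst hc; subst hd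
        rw [if_pos (by simp [List.isPrefixOf])]
        have hlen : (List.drop (['\n','\t'] : List Char).length ('\n' :: '\t' :: r)).length ≤ f := by
          simp at h ⊢; omega
        rw [ih _ _ hlen]
        simp only [List.length_cons, List.length_nil, Nat.zero_add, List.drop_succ_cons,
          List.drop_zero]
        simp [cntNT, sw_cons]; omega
      · rw [if_neg (by simp [List.isPrefixOf]; tauto)]
        have hlen : (d :: r).length ≤ f := by simp at h ⊢; omega
        rw [ih _ _ hlen]
        have hx : cntNT (c :: d :: r) = cntNT (d :: r) := by
          simp only [cntNT, sw_cons]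
          rw [if_neg (by simpa using hm)]
          omega
        rw [hx]

theorem count_nt_eq (l : List Char) : PySem.Chars.count l ['\n', '\t'] = cntNT l := by
  unfold PySem.Chars.count
  rw [if_neg (by simp), count_go_nt _ _ _ (le_refl _)]
  simp

theorem splitNL_head_startswith (r : List Char) (hh : List Char) (tt : List (List Char))
    (hs : splitNL r = hh :: tt) :
    PySem.Chars.startswith hh ['\t'] = PySem.Chars.startswith r ['\t'] := by
  cases r with
  | nil =>
    have h0 : splitNL ([] : List Char) = [[]] := rfl
    rw [h0] at hs; rw [List.cons.injEq] at hs; rw [← hs.1]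
  | cons d r' =>
    by_cases hd : d = '\n'
    · subst hd
      have h1 : splitNL ('\n' :: r') = [] :: splitNL r' := by simp [splitNL]
      rw [h1] at hs; rw [List.cons.injEq] at hs; rw [← hs.1]
      rw [sw_nil, sw_cons]
      simp
    · obtain ⟨h2, t2, hs2⟩ : ∃ h2 t2, splitNL r' = h2 :: t2 := by
        cases hx : splitNL r' with
        | nil => exact absurd hx (splitNL_ne_nil r')
        | cons a b => exact ⟨a, b, rfl⟩
      have h1 : splitNL (d :: r') = (d :: h2) :: t2 := by
        simp only [splitNL, if_neg hd, hs2]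
      rw [h1] at hs; rw [List.cons.injEq] at hs; rw [← hs.1]
      rw [sw_cons, sw_cons]

theorem main_count (l : List Char) :
    (splitNL l).countP (fun p => PySem.Chars.startswith p ['\t'])
      = (if PySem.Chars.startswith l ['\t'] then 1 else 0) + cntNT l := by
  induction l with
  | nil => simp [splitNL, cntNT, sw_nil]
  | cons c r ih =>
    by_cases hc : c = '\n'
    · subst hc
      have h1 : splitNL ('\n' :: r) = [] :: splitNL r := by simp [splitNL]
      rw [h1, List.countP_cons, ih]
      simp [sw_nil, sw_cons, cntNT]
    · obtain ⟨hh, tt, hs⟩ : ∃ hh tt, splitNL r = hh :: tt := by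
        cases hx : splitNL r with
        | nil => exact absurd hx (splitNL_ne_nil r)
        | cons a b => exact ⟨a, b, rfl⟩
      have hstep : splitNL (c :: r) = (c :: hh) :: tt := by
        simp only [splitNL, if_neg hc, hs]
      rw [hstep, List.countP_cons]
      rw [hs, List.countP_cons] at ih
      rw [splitNL_head_startswith r hh tt hs] at ih
      have hcnt : cntNT (c :: r) = cntNT r := by
        simp only [cntNT]
        rw [if_neg (by intro hx; exact hc hx.1)]
        omega
      rw [sw_cons, sw_cons, hcnt]
      by_cases h : c = '\t' <;>
        by_cases hr : PySem.Chars.startswith r ['\t'] = true <;>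
        simp [h, hr] at ih ⊢ <;> omega

-- ===== VERDICT (by name: the statement is the Claim_ definition above) =====
theorem get_validation_issue_count_py_spec : Claim_equal_get_validation_issue_count_py := by
  intro s _
  unfold Spec_get_validation_issue_count_py get_validation_issue_count_py get_validation_issue_count_py_alt
  simp only [splitOn_nl_eq]
  have hfold : ∀ (L : List (List Char)),
      L.foldl (fun acc line => if PySem.Chars.startswith line ['\t'] then acc + 1 else acc) (0 : Int)
        = (L.countP (fun p => PySem.Chars.startswith p ['\t']) : Int) := by
    intro L
    rw [PySem.List.foldl_if_add_one]
    simp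
  have hB : PySem.Str.startswith s "\t" = PySem.Chars.startswith s.toList ['\t'] := rfl
  have hC : PySem.Str.count s "\n\t" = PySem.Chars.count s.toList ['\n', '\t'] := rfl
  rw [hB, hC, count_nt_eq]
  by_cases hg : splitNL s.toList = [[]]
  · rw [if_neg (by simp [hg])]
    have hmc := main_count s.toList
    rw [hg] at hmc
    simp [sw_nil] at hmc
    by_cases hsw : PySem.Chars.startswith s.toList ['\t'] = true
    · rw [hsw] at hmc; simp at hmc; omega
    · simp only [Bool.not_eq_true] at hsw
      rw [hsw] at hmc ⊢
      simp at hmc ⊢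
      omega
  · rw [if_pos (by simp [hg]), hfold, main_count]
    push_cast
    by_cases h : PySem.Chars.startswith s.toList ['\t'] = true <;> simp [h]
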